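-- pv_equiv track=rewrite | github.com/yangtao0304/hands-on-programming-exercise | one-problem-per-day/1013.py | canThreePartsEqualSum2
-- ===== SOURCE A (Python) =====
-- from typing import List
--
-- def canThreePartsEqualSum2(A: List[int]) -> bool:
--     n = len(A)
--     sum_A = sum(A)
--     if n < 3:
--         return False
--     if sum_A % 3 != 0:
--         return False
--     sum_A = sum_A//3
--     tmp = 0
--     time = 0
--     for i in A:
--         tmp += i
--         if tmp == sum_A:
--             time += 1
--             tmp = 0
--     if time >= 3:
--         return True
--     return False
-- ===== SOURCE B (Python) =====
-- from typing import List
--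
-- def canThreePartsEqualSum2(A: List[int]) -> bool:
--     # Non-resetting prefix sum; search for the two cut points prefix==target
--     # and then prefix==2*target with a non-empty third part.
--     n = len(A)
--     total = sum(A)
--     if n < 3 or total % 3 != 0:
--         return False
--     target = total // 3
--     prefix = 0
--     found_first = False
--     for idx, x in enumerate(A):
--         prefix += x
--         if not found_first:
--             if prefix == target:
--                 found_first = True
--         elif prefix == 2 * target and idx < n - 1:
--             return True
--     return False
-- ===== Notes on version B (the rewrite author's own statement) =====
-- stated objective: alternative
-- what changed: Replaces A's resetting accumulator that greedily counts target-sum segments up to a threshold (time>=3) with a non-resetting cumulative prefix sum searched for two cut landmarks (prefix==target, then prefix==2*target before the last element) with an early True return.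
import Mathlib
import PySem

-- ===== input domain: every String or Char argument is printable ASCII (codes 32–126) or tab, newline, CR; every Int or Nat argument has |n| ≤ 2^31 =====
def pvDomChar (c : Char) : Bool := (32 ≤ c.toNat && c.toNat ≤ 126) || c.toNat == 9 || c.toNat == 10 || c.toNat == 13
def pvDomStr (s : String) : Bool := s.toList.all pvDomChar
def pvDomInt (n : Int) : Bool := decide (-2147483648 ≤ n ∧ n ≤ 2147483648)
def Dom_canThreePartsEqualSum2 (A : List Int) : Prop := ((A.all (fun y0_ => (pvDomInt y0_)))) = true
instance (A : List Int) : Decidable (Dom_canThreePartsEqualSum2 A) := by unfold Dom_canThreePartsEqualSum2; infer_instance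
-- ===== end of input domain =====

-- B replaces A's resetting accumulator + segment counter with a non-resetting
-- prefix sum searched for two fixed cut points (alternative decomposition, same cost).

-- ===== PORT A =====
-- greedy loop: resetting accumulator tmp, counter time; result is time >= 3
def canThreePartsEqualSum2 (A : List Int) : Bool :=
  let n : Int := A.length
  let sumA := A.sum
  if n < 3 then false
  else if PySem.Int.mod sumA 3 ≠ 0 then false
  else
    let t := PySem.Int.floordiv sumA 3
    let st := A.foldl (fun (s : Int × Int) i =>
      if s.1 + i = t then (0, s.2 + 1) else (s.1 + i, s.2)) (0, 0)
    if st.2 ≥ 3 then true else false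

-- ===== PORT B =====
-- B's loop `for idx, x in enumerate(A)` with early return True
def loopB (t n : Int) : List Int → Int → Int → Bool → Bool
  | [], _, _, _ => false
  | x :: rest, idx, pre, foundFirst =>
    let pre' := pre + x
    if !foundFirst then
      if pre' = t then loopB t n rest (idx + 1) pre' true
      else loopB t n rest (idx + 1) pre' false
    else if pre' = 2 * t ∧ idx < n - 1 then true
    else loopB t n rest (idx + 1) pre' foundFirst

def canThreePartsEqualSum2_alt (A : List Int) : Bool :=
  let n : Int := A.length
  let total := A.sum
  if n < 3 ∨ PySem.Int.mod total 3 ≠ 0 then false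
  else loopB (PySem.Int.floordiv total 3) n A 0 0 false

-- ===== PRECONDITION & SPEC =====
def Spec_canThreePartsEqualSum2 (A : List Int) (out : Bool) : Prop := out = canThreePartsEqualSum2_alt A
instance (A : List Int) (out : Bool) : Decidable (Spec_canThreePartsEqualSum2 A out) := by unfold Spec_canThreePartsEqualSum2; infer_instance

-- ===== CLAIM (what is proved, stated in full; the proofs are below) =====
def Claim_equal_canThreePartsEqualSum2 : Prop := ∀ (A : List Int), Dom_canThreePartsEqualSum2 A → Spec_canThreePartsEqualSum2 A (canThreePartsEqualSum2 A)

-- ===== LEMMAS AND PROOFS =====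

-- greedy reset count of A's loop (the `time` component on its own)
def gcount (t : Int) : Int → List Int → Int
  | _, [] => 0
  | tmp, x :: xs => if tmp + x = t then 1 + gcount t 0 xs else gcount t (tmp + x) xs

theorem foldl_snd_eq_gcount (t : Int) (l : List Int) :
    ∀ tmp time : Int,
      (l.foldl (fun (s : Int × Int) i =>
        if s.1 + i = t then (0, s.2 + 1) else (s.1 + i, s.2)) (tmp, time)).2
      = time + gcount t tmp l := by
  induction l with
  | nil => intro tmp time; simp [gcount]
  | cons x xs ih =>
      intro tmp time
      simp only [List.foldl_cons, gcount]
      by_cases h : tmp + x = t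
      · rw [if_pos h, if_pos h, ih]; ring
      · rw [if_neg h, if_neg h, ih]

theorem gcount_nonneg (t : Int) : ∀ (l : List Int) (tmp : Int), 0 ≤ gcount t tmp l := by
  intro l
  induction l with
  | nil => intro tmp; simp [gcount]
  | cons x xs ih =>
      intro tmp
      simp only [gcount]
      by_cases h : tmp + x = t
      · rw [if_pos h]; have := ih 0; omega
      · rw [if_neg h]; exact ih (tmp + x)

theorem gcount_pos (t : Int) : ∀ (l : List Int) (tmp : Int),
    l ≠ [] → tmp + l.sum = t → 1 ≤ gcount t tmp l := by
  intro l
  induction l with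
  | nil => intro tmp h _; exact absurd rfl h
  | cons x xs ih =>
      intro tmp _ hsum
      simp only [gcount]
      by_cases h : tmp + x = t
      · rw [if_pos h]
        have := gcount_nonneg t xs 0
        omega
      · have hne : xs ≠ [] := by
          intro he; subst he; simp at hsum; exact h hsum
        rw [if_neg h]
        exact ih (tmp + x) hne (by simp at hsum ⊢; omega)

theorem loopB_stage1 (t n : Int) : ∀ (l : List Int) (idx pre : Int),
    pre + l.sum = 3 * t → idx + (l.length : Int) = n →
    loopB t n l idx pre true = decide (2 ≤ gcount t (pre - t) l) := by
  intro l
  induction l with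
  | nil => intro idx pre _ _; simp [loopB, gcount]
  | cons x xs ih =>
      intro idx pre hsum hlen
      simp only [loopB, Bool.not_true, Bool.false_eq_true, if_false]
      have hx : (pre - t + x = t) ↔ (pre + x = 2 * t) := by omega
      by_cases h2 : pre + x = 2 * t
      · by_cases hxs : xs = []
        · subst hxs
          have hni : ¬ idx < n - 1 := by simp at hlen; omega
          rw [if_neg (fun hc => hni hc.2)]
          simp [loopB, gcount, if_pos (hx.mpr h2)]
        · have hlt : idx < n - 1 := by
            have h1 : 1 ≤ (xs.length : Int) := by
              cases xs with
              | nil => exact absurd rfl hxs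
              | cons a b => simp
            simp at hlen; omega
          have hg : 1 ≤ gcount t 0 xs := by
            apply gcount_pos t xs 0 hxs
            simp at hsum; omega
          rw [if_pos (⟨h2, hlt⟩ : pre + x = 2 * t ∧ idx < n - 1)]
          simp only [gcount, if_pos (hx.mpr h2)]
          rw [eq_comm, decide_eq_true_eq]
          omega
      · have hx' : ¬ (pre - t + x = t) := fun h => h2 (hx.mp h)
        rw [if_neg (fun hc => h2 hc.1)]
        have hih := ih (idx + 1) (pre + x) (by simp at hsum ⊢; omega) (by simp at hlen ⊢; omega)
        rw [hih, show pre + x - t = pre - t + x from by omega]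
        simp only [gcount, if_neg hx']

theorem loopB_stage0 (t n : Int) : ∀ (l : List Int) (idx pre : Int),
    pre + l.sum = 3 * t → idx + (l.length : Int) = n →
    loopB t n l idx pre false = decide (3 ≤ gcount t pre l) := by
  intro l
  induction l with
  | nil => intro idx pre _ _; simp [loopB, gcount]
  | cons x xs ih =>
      intro idx pre hsum hlen
      simp only [loopB, Bool.not_false]
      rw [if_pos trivial]
      by_cases h : pre + x = t
      · rw [if_pos h]
        have hih := loopB_stage1 t n xs (idx + 1) (pre + x)
          (by simp at hsum ⊢; omega) (by simp at hlen ⊢; omega)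
        rw [hih, show pre + x - t = 0 from by omega]
        simp only [gcount, if_pos h]
        rw [decide_eq_decide]
        omega
      · rw [if_neg h]
        have hih := ih (idx + 1) (pre + x) (by simp at hsum ⊢; omega) (by simp at hlen ⊢; omega)
        rw [hih]
        simp only [gcount, if_neg h]

-- ===== VERDICT (by name: the statement is the Claim_ definition above) =====
theorem canThreePartsEqualSum2_spec : Claim_equal_canThreePartsEqualSum2 := by
  intro A _
  unfold Spec_canThreePartsEqualSum2
  simp only [canThreePartsEqualSum2, canThreePartsEqualSum2_alt]
  by_cases hn : (A.length : Int) < 3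
  · rw [if_pos hn, if_pos (Or.inl hn)]
  · by_cases hm : PySem.Int.mod A.sum 3 = 0
    · rw [if_neg hn, if_neg (fun h => h hm),
        if_neg (not_or.mpr ⟨hn, not_not_intro hm⟩)]
      set t := PySem.Int.floordiv A.sum 3 with ht
      have hsum : A.sum = 3 * t := by
        have hfm := PySem.Int.floordiv_mul_add_mod A.sum 3
        rw [hm] at hfm; omega
      rw [loopB_stage0 t (A.length : Int) A 0 0 (by omega) (by simp)]
      have hA := foldl_snd_eq_gcount t A 0 0
      by_cases h3 : 3 ≤ gcount t 0 A
      · rw [if_pos (by rw [hA]; omega), decide_eq_true h3]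
      · rw [if_neg (by rw [hA]; omega), eq_comm, decide_eq_false_iff_not]
        omega
    · rw [if_neg hn, if_pos hm, if_pos (Or.inr hm)]
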